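-- pv_equiv track=rewrite | github.com/BookCatKid/shedulegen | format_schedule.py | format_schedule_for_events
-- ===== SOURCE A (Python) =====
-- def parse_event_summary(summary):
--     """
--     Parses an event title to extract the class name and period number.
--     - If the details part starts with "digit*", the class name becomes "Foundations".
--     - Otherwise, the class name is everything before " - ".
--     - Period number is extracted from the "Block #" pattern.
--     Example 1: "Graphic Design - 6 Block 6" -> ("Graphic Design", "6")
--     Example 2: "US History - 7* Block 7" -> ("Foundations", "7")
--     Returns (class_name, period_number) on success, or (None, None) on failure.
--     """
--     if " - " not in summary:
--         return None, None
--
--     original_class_name, details_part = summary.split(" - ", 1)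
--     original_class_name = original_class_name.strip()
--     details_part = details_part.strip()
--
--     # First, find the required "Block #" to get the period number
--     lower_details = details_part.lower()
--     keyword = "block "
--     if keyword not in lower_details:
--         return None, None
--
--     start_index = lower_details.find(keyword) + len(keyword)
--     period_string_part = details_part[start_index:].strip()
--     if not period_string_part:
--         return None, None
--
--     potential_period = period_string_part.split()[0]
--     if not potential_period.isdigit():
--         return None, None
--     period_number = potential_period
--
--     # Now, determine the final class name based on the special rule
--     # Check if the details part (e.g., "7* Block 7") starts with a digit and an asterisk
--     if len(details_part) >= 2 and details_part[0].isdigit() and details_part[1] == '*':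
--         final_class_name = "Foundations"
--     else:
--         final_class_name = original_class_name
--
--     return final_class_name, period_number
--
-- def format_room_name(location):
--     """
--     Adds a prefix to the room name if it's a 2 or 3-digit number.
--     - 3 digits -> "USQuad ###"
--     - 2 digits -> "VASC ##"
--     """
--     location_str = str(location or "").strip()
--     if location_str.isdigit():
--         if len(location_str) == 3:
--             return f"USQuad {location_str}"
--         elif len(location_str) == 2:
--             return f"VASC {location_str}"
--     return location_str
--
-- def format_schedule_for_events(events):
--     """
--     Given a list of calendar events, return (formatted_schedule_dict, unrecognized_events_list).
--     """
--     formatted_schedule = {}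
--     unrecognized_events = []
--     for event in events:
--         summary = event.get("summary")
--         if not summary:
--             continue
--         class_name, period = parse_event_summary(summary)
--         if class_name is None or period is None:
--             unrecognized_events.append(summary)
--             continue
--         raw_location = event.get("location", "")
--         room = format_room_name(raw_location)
--         if period not in formatted_schedule:
--             formatted_schedule[period] = {
--                 "name": [],
--                 "room": []
--             }
--         formatted_schedule[period]["name"].append(class_name)
--         formatted_schedule[period]["room"].append(room)
--     return formatted_schedule, unrecognized_events
-- ===== SOURCE B (Python) =====
-- import re
--
-- _BLOCK_RE = re.compile(r'block \s*(\S+)', re.IGNORECASE)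
-- _ROOM_PREFIX = {2: "VASC ", 3: "USQuad "}
--
--
-- def _parse_summary(summary):
--     """Return (class_name, period) or None, via one regex pass instead of
--     find/slice/strip/split scanning."""
--     name, sep, details = summary.partition(" - ")
--     if not sep:
--         return None
--     details = details.strip()
--     m = _BLOCK_RE.search(details)
--     if not m or not m.group(1).isdigit():
--         return None
--     cls = "Foundations" if re.match(r'\d\*', details) else name.strip()
--     return cls, m.group(1)
--
--
-- def _room(location):
--     s = (location or "").strip()
--     if s.isdigit():
--         return _ROOM_PREFIX.get(len(s), "") + s
--     return s
--
--
-- def format_schedule_for_events(events):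
--     # pass 1: parse every event into a flat row (period, class, room)
--     rows = []
--     unrecognized = []
--     for event in events:
--         summary = event.get("summary")
--         if not summary:
--             continue
--         parsed = _parse_summary(summary)
--         if parsed is None:
--             unrecognized.append(summary)
--         else:
--             cls, period = parsed
--             rows.append((period, cls, _room(event.get("location", ""))))
--     # pass 2: group the rows by period
--     schedule = {}
--     for period, cls, room in rows:
--         entry = schedule.setdefault(period, {"name": [], "room": []})
--         entry["name"].append(cls)
--         entry["room"].append(room)
--     return schedule, unrecognized
-- ===== Notes on version B (the rewrite author's own statement) =====
-- stated objective: idiomatic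
-- what changed: parse_event_summary's manual lower/find/slice/strip/split index scanning is replaced by a single compiled case-insensitive regex search (r'block \s*(\S+)') plus partition(' - ') and a table-driven room prefix, and the outer loop is split into a parse pass producing flat rows followed by a setdefault grouping pass.
import Mathlib
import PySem

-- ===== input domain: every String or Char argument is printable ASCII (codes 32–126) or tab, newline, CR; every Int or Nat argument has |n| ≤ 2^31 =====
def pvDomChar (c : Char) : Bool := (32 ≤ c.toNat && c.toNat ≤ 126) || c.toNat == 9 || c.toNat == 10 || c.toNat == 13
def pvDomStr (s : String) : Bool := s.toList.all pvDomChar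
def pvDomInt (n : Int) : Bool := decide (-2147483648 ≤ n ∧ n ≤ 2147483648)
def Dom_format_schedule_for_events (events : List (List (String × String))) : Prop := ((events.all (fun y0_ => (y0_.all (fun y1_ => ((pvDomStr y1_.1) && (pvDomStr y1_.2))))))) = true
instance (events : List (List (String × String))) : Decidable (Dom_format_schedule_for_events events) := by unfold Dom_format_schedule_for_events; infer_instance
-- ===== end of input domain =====

-- B re-implements the summary parser as one left-to-right case-insensitive pattern scan
-- (a compiled regex in Source B) instead of lower/find/slice/strip/split, and splits the outer
-- loop into a parse pass plus a grouping pass; objective: more idiomatic, same results.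

-- ===== PORT A =====

/-- `parse_event_summary` (A). Works on `List Char`; `details[start_index:]` is a
    nonnegative slice (`start_index = find + 6 ≥ 6` under the `in` guard), ported with
    `PySem.List.slice`; `details_part[0]`/`[1]` are guarded by the length test, ported
    with `getD`; the 2-tuple unpack of `split(" - ", 1)` always sees exactly 2 pieces
    when `" - " in summary`, the `_` match arm is unreachable. -/
def parseEventSummaryA (summary : String) : Option String × Option String :=
  let cs := summary.toList
  if ¬ (PySem.Chars.isIn " - ".toList cs) then (none, none)
  else
    match PySem.Chars.splitOnMax cs " - ".toList 1 with
    | [n, dpart] =>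
      let name := PySem.Chars.strip n
      let details := PySem.Chars.strip dpart
      let ld := PySem.Chars.lower details
      let kw := "block ".toList
      if ¬ (PySem.Chars.isIn kw ld) then (none, none)
      else
        let start : Int := PySem.Chars.find ld kw + 6
        let p := PySem.Chars.strip (PySem.List.slice details (some start) none)
        if p = [] then (none, none)
        else
          let tok := (PySem.Chars.split₀ p).headD []
          if ¬ (PySem.Chars.strIsdigit tok) then (none, none)
          else
            let finalName :=
              if 2 ≤ details.length ∧ PySem.Chars.isdigit (details.getD 0 ' ') ∧ details.getD 1 ' ' = '*'
              then "Foundations".toList else name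
            (some (String.ofList finalName), some (String.ofList tok))
    | _ => (none, none)

/-- `format_room_name` (A). `location` is a `str` here, so `str(location or "")` is
    `location` itself (`"" or ""` is `""`). -/
def formatRoomNameA (location : String) : String :=
  let s := PySem.Chars.strip location.toList
  if PySem.Chars.strIsdigit s then
    if s.length = 3 then String.ofList ("USQuad ".toList ++ s)
    else if s.length = 2 then String.ofList ("VASC ".toList ++ s)
    else String.ofList s
  else String.ofList s

/-- the body of A's `for event in events` loop (one iteration on the running state). -/
def scheduleStepA (acc : PySem.Dict String (PySem.Dict String (List String)) × List String)
    (event : List (String × String)) : PySem.Dict String (PySem.Dict String (List String)) × List String :=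
  let ev : PySem.Dict String String := PySem.Dict.mk event
  match ev.get? "summary" with
  | none => acc
  | some summary =>
    if summary = "" then acc
    else
      match parseEventSummaryA summary with
      | (some cls, some period) =>
        let room := formatRoomNameA (ev.getD "location" "")
        let d0 := if acc.1.contains period then acc.1
                  else acc.1.insert period (PySem.Dict.mk [("name", []), ("room", [])])
        let d1 := d0.modify period (PySem.Dict.mk []) (fun inner => inner.modify "name" [] (· ++ [cls]))
        let d2 := d1.modify period (PySem.Dict.mk []) (fun inner => inner.modify "room" [] (· ++ [room]))
        (d2, acc.2)
      | _ => (acc.1, acc.2 ++ [summary])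

def format_schedule_for_events (events : List (List (String × String))) : (List (String × List (String × List String))) × List String :=
  let res := events.foldl scheduleStepA (PySem.Dict.mk [], [])
  (res.1.items.map (fun kv => (kv.1, kv.2.items)), res.2)

-- ===== PORT B =====

/-- first `\s*(\S+)` token: skip whitespace, take the non-whitespace run. -/
def firstTok (l : List Char) : List Char :=
  (l.dropWhile PySem.Chars.isspace).takeWhile (fun c => !PySem.Chars.isspace c)

/-- Hand port of `_BLOCK_RE.search(details)` for the fixed pattern
    `re.compile(r'block \s*(\S+)', re.IGNORECASE)` (exact on the ASCII domain: regex
    `\s`/`\S` agree with `str.isspace` there): try each position left to right; the whole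
    pattern matches where a case-insensitive `"block "` starts and a non-empty token
    follows, and the capture is that token. -/
def scanBlock : List Char → Option (List Char)
  | [] => none
  | c :: rest =>
    if "block ".toList.isPrefixOf (PySem.Chars.lower (c :: rest)) then
      let t := firstTok ((c :: rest).drop 6)
      if t = [] then scanBlock rest else some t
    else scanBlock rest

/-- `_parse_summary` (B): `partition(" - ")` via the first occurrence, then the regex scan. -/
def parseSummaryB (summary : String) : Option (String × String) :=
  let cs := summary.toList
  let i := PySem.Chars.find cs " - ".toList
  if i = -1 then none
  else
    let name := cs.take i.toNat
    let details := PySem.Chars.strip (cs.drop (i.toNat + 3))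
    match scanBlock details with
    | none => none
    | some tok =>
      if ¬ (PySem.Chars.strIsdigit tok) then none
      else
        let cls :=
          match details with          -- re.match(r'\d\*', details)
          | c0 :: c1 :: _ =>
            if PySem.Chars.isdigit c0 ∧ c1 = '*' then "Foundations".toList
            else PySem.Chars.strip name
          | _ => PySem.Chars.strip name
        some (String.ofList cls, String.ofList tok)

/-- `_room` (B): prefix looked up in a table keyed by length. -/
def roomB (location : String) : String :=
  let s := PySem.Chars.strip location.toList
  if PySem.Chars.strIsdigit s then
    String.ofList ((PySem.Dict.getD (PySem.Dict.mk [((2 : Nat), "VASC ".toList), (3, "USQuad ".toList)]) s.length []) ++ s)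
  else String.ofList s

/-- pass 1 body: parse one event into a flat row (period, class, room) or an unrecognized summary. -/
def rowStepB (acc : List (String × String × String) × List String)
    (event : List (String × String)) : List (String × String × String) × List String :=
  let ev : PySem.Dict String String := PySem.Dict.mk event
  match ev.get? "summary" with
  | none => acc
  | some summary =>
    if summary = "" then acc
    else
      match parseSummaryB summary with
      | none => (acc.1, acc.2 ++ [summary])
      | some (cls, period) =>
        (acc.1 ++ [(period, cls, roomB (ev.getD "location" ""))], acc.2)

/-- pass 2 body: group one row by period (the mutated `setdefault` entry, written back). -/
def groupStepB (d : PySem.Dict String (PySem.Dict String (List String)))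
    (row : String × String × String) : PySem.Dict String (PySem.Dict String (List String)) :=
  let d' := d.setdefault row.1 (PySem.Dict.mk [("name", []), ("room", [])])
  d'.insert row.1
    (((d'.getD row.1 (PySem.Dict.mk [])).modify "name" [] (· ++ [row.2.1])).modify "room" []
      (· ++ [row.2.2]))

def format_schedule_for_events_alt (events : List (List (String × String))) : (List (String × List (String × List String))) × List String :=
  let acc := events.foldl rowStepB ([], [])
  let schedule := acc.1.foldl groupStepB (PySem.Dict.mk [])
  (schedule.items.map (fun kv => (kv.1, kv.2.items)), acc.2)

-- ===== PRECONDITION & SPEC =====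
def Spec_format_schedule_for_events (events : List (List (String × String))) (out : (List (String × List (String × List String))) × List String) : Prop := out = format_schedule_for_events_alt events
instance (events : List (List (String × String))) (out : (List (String × List (String × List String))) × List String) : Decidable (Spec_format_schedule_for_events events out) := by unfold Spec_format_schedule_for_events; infer_instance

-- ===== CLAIM (what is proved, stated in full; the proofs are below) =====
def Claim_equal_format_schedule_for_events : Prop := ∀ (events : List (List (String × String))), Dom_format_schedule_for_events events → Spec_format_schedule_for_events events (format_schedule_for_events events)

-- ===== LEMMAS AND PROOFS =====

theorem findgo_shift (sub : List Char) (h : sub ≠ []) : ∀ (l : List Char) (k : Nat),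
    PySem.Chars.find.go sub l k =
      if PySem.Chars.find.go sub l 0 = -1 then -1 else PySem.Chars.find.go sub l 0 + k := by
  intro l
  induction l with
  | nil => intro k; simp [PySem.Chars.find.go, List.isEmpty_iff, h]
  | cons c rest ih =>
    intro k
    rw [PySem.Chars.find.go]
    conv_rhs => rw [PySem.Chars.find.go]
    by_cases hp : sub.isPrefixOf (c :: rest)
    · simp [hp]
    · rw [if_neg hp, if_neg hp, ih (k+1), ih 1]
      have h0 : -1 ≤ PySem.Chars.find.go sub rest 0 := by
        have := PySem.Chars.neg_one_le_find rest sub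
        simpa [PySem.Chars.find] using this
      by_cases hn : PySem.Chars.find.go sub rest 0 = -1
      · simp [hn]
      · rw [if_neg hn, if_neg hn, if_neg (by omega)]
        push_cast; ring

theorem find_cons (sub : List Char) (h : sub ≠ []) (c : Char) (rest : List Char) :
    PySem.Chars.find (c :: rest) sub =
      if sub.isPrefixOf (c :: rest) then 0
      else if PySem.Chars.find rest sub = -1 then -1 else PySem.Chars.find rest sub + 1 := by
  unfold PySem.Chars.find
  rw [PySem.Chars.find.go]
  by_cases hp : sub.isPrefixOf (c :: rest)
  · simp [hp]
  · rw [if_neg hp, if_neg hp, findgo_shift sub h rest 1]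
    by_cases hn : PySem.Chars.find.go sub rest 0 = -1 <;> simp [hn]

theorem find_nonneg_of_ne (s sub : List Char) (h : PySem.Chars.find s sub ≠ -1) :
    0 ≤ PySem.Chars.find s sub := by
  have := PySem.Chars.neg_one_le_find s sub
  omega

theorem splitgo_m0 (sep : List Char) (fuel : Nat) (l' : List Char) (acc' : List (List Char))
    (hf : 0 < fuel) :
    PySem.Chars.splitOnMax.go sep fuel 0 l' [] acc' = acc'.reverse ++ [l'] := by
  match fuel, l' with
  | f+1, [] => rw [PySem.Chars.splitOnMax.go]; simp; omega
  | f+1, c :: rest => rw [PySem.Chars.splitOnMax.go]; simp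

theorem splitgo (sep : List Char) (hsep : sep ≠ []) :
    ∀ (fuel : Nat) (l cur : List Char) (acc : List (List Char)), l.length < fuel →
    PySem.Chars.splitOnMax.go sep fuel 1 l cur acc =
      if PySem.Chars.find l sep = -1 then acc.reverse ++ [cur.reverse ++ l]
      else acc.reverse ++ [cur.reverse ++ l.take (PySem.Chars.find l sep).toNat,
                           l.drop ((PySem.Chars.find l sep).toNat + sep.length)] := by
  intro fuel
  induction fuel with
  | zero => intro l cur acc h; omega
  | succ f ih =>
    intro l cur acc h
    match l with
    | [] =>
      rw [PySem.Chars.splitOnMax.go]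
      have hhf : PySem.Chars.find [] sep = -1 := by
        simp [PySem.Chars.find, PySem.Chars.find.go, List.isEmpty_iff, hsep]
      simp [hhf]
      omega
    | c :: rest =>
      rw [PySem.Chars.splitOnMax.go]
      simp only [Nat.one_ne_zero, if_false]
      rw [find_cons sep hsep c rest]
      by_cases hp : sep.isPrefixOf (c :: rest)
      · rw [if_pos hp, if_pos hp]
        have hl : sep.length ≤ (c :: rest).length :=
          (List.isPrefixOf_iff_prefix.mp hp).length_le
        rw [splitgo_m0 sep f _ _ (by simp at h; omega)]
        simp
      · rw [if_neg hp, if_neg hp]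
        rw [ih rest (c :: cur) acc (by simpa using h)]
        by_cases hn : PySem.Chars.find rest sep = -1
        · simp [hn]
        · have h0 : 0 ≤ PySem.Chars.find rest sep := find_nonneg_of_ne _ _ hn
          have ht : (PySem.Chars.find rest sep + 1).toNat = (PySem.Chars.find rest sep).toNat + 1 := by omega
          simp [hn, ht, List.take_succ_cons, List.drop_succ_cons, Nat.add_right_comm]
          omega

theorem splitOnMax_eq (sep : List Char) (hsep : sep ≠ []) (cs : List Char)
    (h : PySem.Chars.find cs sep ≠ -1) :
    PySem.Chars.splitOnMax cs sep 1 =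
      [cs.take (PySem.Chars.find cs sep).toNat,
       cs.drop ((PySem.Chars.find cs sep).toNat + sep.length)] := by
  unfold PySem.Chars.splitOnMax
  rw [if_neg (by omega)]
  have h1 : (1 : Int).toNat = 1 := rfl
  rw [h1, splitgo sep hsep (cs.length + 1) cs [] [] (by omega), if_neg h]
  simp

theorem dropWhile_head_false {p : Char → Bool} : ∀ {l t : List Char} {c : Char},
    List.dropWhile p l = c :: t → p c = false := by
  intro l
  induction l with
  | nil => intro t c h; simp at h
  | cons a l' ih =>
    intro t c h
    rw [List.dropWhile_cons] at h
    by_cases hp : p a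
    · exact ih (by simpa [hp] using h)
    · simp [hp] at h
      simp [← h.1]
      simpa using hp

theorem rstrip_decomp (y : List Char) :
    ∃ w, y = PySem.Chars.rstrip y ++ w ∧ ∀ x ∈ w, PySem.Chars.isspace x := by
  refine ⟨(y.reverse.takeWhile PySem.Chars.isspace).reverse, ?_, ?_⟩
  · unfold PySem.Chars.rstrip
    conv_lhs => rw [← y.reverse_reverse, ← List.takeWhile_append_dropWhile (p := PySem.Chars.isspace) (l := y.reverse)]
    rw [List.reverse_append]
  · intro x hx
    exact List.mem_takeWhile_imp (by simpa using hx)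

theorem takeWhile_append_ws (a w : List Char) (hw : ∀ x ∈ w, PySem.Chars.isspace x) :
    (a ++ w).takeWhile (fun c => !PySem.Chars.isspace c) = a.takeWhile (fun c => !PySem.Chars.isspace c) := by
  induction a with
  | nil =>
    simp only [List.nil_append, List.takeWhile_nil]
    cases w with
    | nil => simp
    | cons c t => simp [List.takeWhile_cons, hw c (by simp)]
  | cons c a' ih =>
    simp only [List.cons_append, List.takeWhile_cons]
    by_cases hc : PySem.Chars.isspace c <;> simp [hc, ih]

theorem strip_eq_nil_iff (r : List Char) :
    PySem.Chars.strip r = [] ↔ List.dropWhile PySem.Chars.isspace r = [] := by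
  unfold PySem.Chars.strip PySem.Chars.lstrip
  constructor
  · intro h
    obtain ⟨w, hy, hw⟩ := rstrip_decomp (List.dropWhile PySem.Chars.isspace r)
    rw [h, List.nil_append] at hy
    cases hd : List.dropWhile PySem.Chars.isspace r with
    | nil => rfl
    | cons c t =>
      have hc := dropWhile_head_false hd
      have : PySem.Chars.isspace c := hw c (by rw [← hy, hd]; simp)
      simp [this] at hc
  · intro h; rw [h]; rfl

theorem splitgo0 : ∀ (l cur : List Char) (acc : List (List Char)),
    ∃ t, PySem.Chars.split₀.go l cur acc = acc.reverse ++ t := by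
  intro l
  induction l with
  | nil =>
    intro cur acc
    rw [PySem.Chars.split₀.go]
    by_cases hc : cur.isEmpty <;> simp [hc]
  | cons c rest ih =>
    intro cur acc
    rw [PySem.Chars.split₀.go]
    by_cases hs : PySem.Chars.isspace c
    · by_cases hc : cur.isEmpty
      · simpa [hs, hc] using ih [] acc
      · simp only [hs, hc, if_true, if_false]
        obtain ⟨t, ht⟩ := ih [] (cur.reverse :: acc)
        exact ⟨cur.reverse :: t, by simp [ht]⟩
    · simpa [hs] using ih (c :: cur) acc

theorem splitgo_main : ∀ (l cur : List Char) (acc : List (List Char)), cur ≠ [] →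
    ∃ t, PySem.Chars.split₀.go l cur acc =
      acc.reverse ++ (cur.reverse ++ l.takeWhile (fun c => !PySem.Chars.isspace c)) :: t := by
  intro l
  induction l with
  | nil =>
    intro cur acc hc
    rw [PySem.Chars.split₀.go]
    simp [List.isEmpty_iff, hc]
  | cons c rest ih =>
    intro cur acc hc
    rw [PySem.Chars.split₀.go]
    by_cases hs : PySem.Chars.isspace c
    · simp only [hs, if_true, List.isEmpty_iff, hc, if_false]
      obtain ⟨t, ht⟩ := splitgo0 rest [] (cur.reverse :: acc)
      refine ⟨t, ?_⟩
      simp [ht, List.takeWhile_cons, hs]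
    · simp only [hs, if_false]
      obtain ⟨t, ht⟩ := ih (c :: cur) acc (by simp)
      refine ⟨t, ?_⟩
      simp [ht, List.takeWhile_cons, hs]

theorem split₀_head (c : Char) (l : List Char) (hc : ¬ PySem.Chars.isspace c) :
    (PySem.Chars.split₀ (c :: l)).headD [] = (c :: l).takeWhile (fun c => !PySem.Chars.isspace c) := by
  unfold PySem.Chars.split₀
  rw [PySem.Chars.split₀.go]
  simp only [hc, if_false, Bool.false_eq_true]
  obtain ⟨t, ht⟩ := splitgo_main l [c] [] (by simp)
  rw [ht]
  simp [List.takeWhile_cons, hc]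

theorem strip_head_tok (r : List Char) (h : PySem.Chars.strip r ≠ []) :
    (PySem.Chars.split₀ (PySem.Chars.strip r)).headD [] = firstTok r := by
  set y := List.dropWhile PySem.Chars.isspace r with hy
  have hynil : y ≠ [] := by
    intro hn
    exact h ((strip_eq_nil_iff r).mpr hn)
  obtain ⟨w, hdec, hw⟩ := rstrip_decomp y
  have hstr : PySem.Chars.strip r = PySem.Chars.rstrip y := rfl
  set a := PySem.Chars.rstrip y with ha
  have hanil : a ≠ [] := by rw [← hstr]; exact h
  obtain ⟨c, a', hc⟩ := List.exists_cons_of_ne_nil hanil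
  have hyc : y = c :: (a' ++ w) := by rw [hdec, hc]; simp
  have hcns : PySem.Chars.isspace c = false := dropWhile_head_false (hy ▸ hyc)
  have : firstTok r = a.takeWhile (fun c => !PySem.Chars.isspace c) := by
    unfold firstTok
    rw [← hy, hdec, takeWhile_append_ws a w hw]
  rw [this, hstr, hc, split₀_head c a' (by simp [hcns])]

theorem firstTok_eq_nil_iff (X : List Char) :
    firstTok X = [] ↔ List.dropWhile PySem.Chars.isspace X = [] := by
  unfold firstTok
  constructor
  · intro h
    cases hd : List.dropWhile PySem.Chars.isspace X with
    | nil => rfl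
    | cons c t =>
      have hc := dropWhile_head_false hd
      rw [hd, List.takeWhile_cons] at h
      simp [hc] at h
  · intro h; rw [h]; rfl

theorem scan_ws : ∀ (l : List Char), (∀ x ∈ l.drop 5, PySem.Chars.isspace x) → scanBlock l = none := by
  intro l
  induction l with
  | nil => intro _; rfl
  | cons c rest ih =>
    intro hws
    have hrest : ∀ x ∈ rest.drop 5, PySem.Chars.isspace x := by
      intro x hx
      have hx2 : x ∈ (List.drop 4 rest).drop 1 := by
        rw [List.drop_drop]; exact hx
      refine hws x ?_
      rw [List.drop_succ_cons]
      exact List.mem_of_mem_drop hx2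
    rw [scanBlock]
    by_cases hp : "block ".toList.isPrefixOf (PySem.Chars.lower (c :: rest))
    · have h6 : (c :: rest).drop 6 = rest.drop 5 := List.drop_succ_cons
      have ht : firstTok ((c :: rest).drop 6) = [] := by
        rw [firstTok_eq_nil_iff, List.dropWhile_eq_nil_iff]
        intro x hx
        rw [h6] at hx
        exact hrest x hx
      simp only [hp, if_true]
      simp only [ht, if_pos]
      exact ih hrest
    · simp only [hp, Bool.false_eq_true, if_false]
      exact ih hrest

theorem scan_eq : ∀ (d : List Char),
    scanBlock d =
      (if PySem.Chars.find (PySem.Chars.lower d) "block ".toList = -1 then none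
       else
         let t := firstTok (d.drop ((PySem.Chars.find (PySem.Chars.lower d) "block ".toList).toNat + 6))
         if t = [] then none else some t) := by
  intro d
  induction d with
  | nil =>
    rw [scanBlock]
    rw [if_pos (by decide)]
  | cons c rest ih =>
    rw [scanBlock]
    by_cases hp : "block ".toList.isPrefixOf (PySem.Chars.lower (c :: rest))
    · have hf : PySem.Chars.find (PySem.Chars.lower (c :: rest)) "block ".toList = 0 := by
        cases hl : PySem.Chars.lower (c :: rest) with
        | nil => simp [PySem.Chars.lower] at hl
        | cons x xs =>
          rw [hl] at hp
          unfold PySem.Chars.find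
          rw [PySem.Chars.find.go, if_pos hp]
          rfl
      rw [hf, if_pos hp, if_neg (show ¬((0:Int) = -1) by decide)]
      simp only [Int.toNat_zero, Nat.zero_add]
      by_cases ht : firstTok ((c :: rest).drop 6) = []
      · rw [ht]
        simp only [if_pos rfl]
        have hwsall : ∀ x ∈ rest.drop 5, PySem.Chars.isspace x := by
          have h2 := (firstTok_eq_nil_iff _).mp ht
          rw [List.dropWhile_eq_nil_iff] at h2
          intro x hx
          refine h2 x ?_
          rw [List.drop_succ_cons]
          exact hx
        exact scan_ws rest hwsall
      · simp only [if_neg ht]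
    · have hkw : ("block ".toList : List Char) ≠ [] := by decide
      have hlc : PySem.Chars.lower (c :: rest) = PySem.Chars.lowerChar c :: PySem.Chars.lower rest := by
        simp [PySem.Chars.lower]
      rw [hlc] at hp ⊢
      rw [if_neg hp, find_cons _ hkw, if_neg hp]
      by_cases hn : PySem.Chars.find (PySem.Chars.lower rest) "block ".toList = -1
      · rw [if_pos (by rw [hn]; simp : (if PySem.Chars.find (PySem.Chars.lower rest) "block ".toList = -1 then (-1 : Int) else PySem.Chars.find (PySem.Chars.lower rest) "block ".toList + 1) = -1)]
        rw [ih, if_pos hn]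
      · have h0 : 0 ≤ PySem.Chars.find (PySem.Chars.lower rest) "block ".toList := find_nonneg_of_ne _ _ hn
        rw [if_neg hn]
        rw [if_neg (show ¬ (PySem.Chars.find (PySem.Chars.lower rest) "block ".toList + 1 = -1) by omega)]
        have htn : (PySem.Chars.find (PySem.Chars.lower rest) "block ".toList + 1).toNat + 6
            = ((PySem.Chars.find (PySem.Chars.lower rest) "block ".toList).toNat + 6) + 1 := by omega
        show scanBlock rest = (let t := firstTok ((c :: rest).drop ((PySem.Chars.find (PySem.Chars.lower rest) "block ".toList + 1).toNat + 6)); if t = [] then none else some t)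
        rw [htn, List.drop_succ_cons, ih, if_neg hn]

theorem foundations_eq (dd nm X : List Char) :
    (if 2 ≤ dd.length ∧ PySem.Chars.isdigit (dd.getD 0 ' ') = true ∧ dd.getD 1 ' ' = '*' then X else nm)
      = (match dd with
         | c0 :: c1 :: _ => if PySem.Chars.isdigit c0 = true ∧ c1 = '*' then X else nm
         | _ => nm) := by
  match dd with
  | [] => simp
  | [c0] => simp
  | c0 :: c1 :: ds =>
    show _ = if PySem.Chars.isdigit c0 = true ∧ c1 = '*' then X else nm
    by_cases h5 : PySem.Chars.isdigit c0 = true ∧ c1 = '*'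
    · rw [if_pos h5]
      rw [if_pos (show 2 ≤ (c0 :: c1 :: ds).length ∧ PySem.Chars.isdigit ((c0 :: c1 :: ds).getD 0 ' ') = true ∧ (c0 :: c1 :: ds).getD 1 ' ' = '*' by
        refine ⟨by simp, ?_, ?_⟩
        · simpa [List.getD] using h5.1
        · simpa [List.getD] using h5.2)]
    · rw [if_neg h5, if_neg (by
        intro hcon
        exact h5 ⟨by simpa [List.getD] using hcon.2.1, by simpa [List.getD] using hcon.2.2⟩)]

theorem parse_eq (s : String) :
    parseEventSummaryA s =
      match parseSummaryB s with
      | some (c, p) => (some c, some p)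
      | none => (none, none) := by
  unfold parseEventSummaryA parseSummaryB
  by_cases h1 : PySem.Chars.find s.toList " - ".toList = -1
  · have h1' : PySem.Chars.find s.toList [' ', '-', ' '] = -1 := h1
    simp [PySem.Chars.isIn, h1']
  · have h1' : ¬ PySem.Chars.find s.toList [' ', '-', ' '] = -1 := h1
    have hsep : (" - ".toList : List Char) ≠ [] := by decide
    have hsplit := splitOnMax_eq _ hsep _ h1
    have hlen : (" - ".toList : List Char).length = 3 := by decide
    rw [hlen] at hsplit
    have hIn : (PySem.Chars.isIn " - ".toList s.toList) = true := by
      simp [PySem.Chars.isIn, bne]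
      exact h1'
    simp only [hIn, hsplit, h1, h1', not_true, not_false_iff, if_false, if_true, ite_false,
      ite_true, Bool.not_eq_true, reduceCtorEq] <;> try exact h1'
    set d := PySem.Chars.strip (List.drop ((PySem.Chars.find s.toList " - ".toList).toNat + 3) s.toList) with hd
    set nm := PySem.Chars.strip (List.take (PySem.Chars.find s.toList " - ".toList).toNat s.toList) with hnm
    rw [scan_eq d]
    by_cases h2 : PySem.Chars.find (PySem.Chars.lower d) "block ".toList = -1
    · rw [if_pos h2]
      have hIn2 : PySem.Chars.isIn "block ".toList (PySem.Chars.lower d) = false := by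
        unfold PySem.Chars.isIn
        rw [h2]
        rfl
      rw [hIn2, if_pos rfl]
    · have hIn2 : PySem.Chars.isIn "block ".toList (PySem.Chars.lower d) = true := by
        simp [PySem.Chars.isIn, bne_iff_ne]
        exact h2
      have h0 : 0 ≤ PySem.Chars.find (PySem.Chars.lower d) "block ".toList :=
        find_nonneg_of_ne _ _ h2
      rw [if_neg h2, hIn2, if_neg (by simp : ¬ (true = false))]
      rw [PySem.List.slice_from d (by omega : (0:Int) ≤ PySem.Chars.find (PySem.Chars.lower d) "block ".toList + 6)]
      have htn : (PySem.Chars.find (PySem.Chars.lower d) "block ".toList + 6).toNat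
          = (PySem.Chars.find (PySem.Chars.lower d) "block ".toList).toNat + 6 := by omega
      rw [htn]
      set r := List.drop ((PySem.Chars.find (PySem.Chars.lower d) "block ".toList).toNat + 6) d with hr
      by_cases h3 : firstTok r = []
      · have hstripnil : PySem.Chars.strip r = [] :=
          (strip_eq_nil_iff r).mpr ((firstTok_eq_nil_iff r).mp h3)
        rw [hstripnil, if_pos rfl, if_pos h3]
      · have hstripne : PySem.Chars.strip r ≠ [] := by
          intro hsn
          exact h3 ((firstTok_eq_nil_iff r).mpr ((strip_eq_nil_iff r).mp hsn))
        have htok : (PySem.Chars.split₀ (PySem.Chars.strip r)).headD [] = firstTok r :=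
          strip_head_tok r hstripne
        rw [if_neg hstripne, if_neg h3, htok]
        by_cases h4 : PySem.Chars.strIsdigit (firstTok r) = false
        · rw [if_pos h4]
          simp [h4]
        · rw [if_neg h4]
          simp only [h4, Bool.false_eq_true, if_false, reduceCtorEq]
          rw [foundations_eq d nm "Foundations".toList]

theorem room_eq (l : String) : formatRoomNameA l = roomB l := by
  unfold formatRoomNameA roomB
  by_cases hdig : PySem.Chars.strIsdigit (PySem.Chars.strip l.toList) = true
  · rw [if_pos hdig, if_pos hdig]
    by_cases h3 : (PySem.Chars.strip l.toList).length = 3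
    · rw [if_pos h3, h3]
      rfl
    · rw [if_neg h3]
      by_cases h2 : (PySem.Chars.strip l.toList).length = 2
      · rw [if_pos h2, h2]
        rfl
      · rw [if_neg h2]
        have e2 : ((2 : Nat) == (PySem.Chars.strip l.toList).length) = false := by
          simpa using Ne.symm h2
        have e3 : ((3 : Nat) == (PySem.Chars.strip l.toList).length) = false := by
          simpa using Ne.symm h3
        have : PySem.Dict.getD
            (PySem.Dict.mk [((2 : Nat), "VASC ".toList), (3, "USQuad ".toList)])
            (PySem.Chars.strip l.toList).length [] = [] := by
          simp [PySem.Dict.getD, PySem.Dict.get?, List.find?, e2, e3]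
        rw [this]
        simp
  · rw [if_neg hdig, if_neg hdig]

theorem stepA_dict_eq (dd : PySem.Dict String (PySem.Dict String (List String)))
    (period cls room : String) :
    (let d0 := if dd.contains period then dd
               else dd.insert period (PySem.Dict.mk [("name", []), ("room", [])]);
     let d1 := d0.modify period (PySem.Dict.mk []) (fun inner => inner.modify "name" [] (· ++ [cls]));
     d1.modify period (PySem.Dict.mk []) (fun inner => inner.modify "room" [] (· ++ [room])))
      = groupStepB dd (period, cls, room) := by
  unfold groupStepB
  have hsd : dd.setdefault period (PySem.Dict.mk [("name", []), ("room", [])])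
      = (if dd.contains period then dd
         else dd.insert period (PySem.Dict.mk [("name", []), ("room", [])])) := by
    unfold PySem.Dict.setdefault PySem.Dict.insert
    by_cases hc : dd.contains period = true <;> simp [hc]
  rw [hsd]
  set d0 := (if dd.contains period then dd
             else dd.insert period (PySem.Dict.mk [("name", []), ("room", [])])) with hd0
  show (d0.modify period (PySem.Dict.mk []) (fun inner => inner.modify "name" [] (· ++ [cls]))).modify
        period (PySem.Dict.mk []) (fun inner => inner.modify "room" [] (· ++ [room]))
      = d0.insert period
          (((d0.getD period (PySem.Dict.mk [])).modify "name" [] (· ++ [cls])).modify "room" [] (· ++ [room]))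
  unfold PySem.Dict.modify
  rw [PySem.Dict.insert_insert_self]
  congr 1
  have : (d0.insert period ((d0.getD period (PySem.Dict.mk [])).insert "name"
        ((d0.getD period (PySem.Dict.mk [])).getD "name" [] ++ [cls]))).getD period (PySem.Dict.mk [])
      = (d0.getD period (PySem.Dict.mk [])).insert "name"
        ((d0.getD period (PySem.Dict.mk [])).getD "name" [] ++ [cls]) := by
    simp [PySem.Dict.getD, PySem.Dict.get?_insert_self]
  rw [this]

theorem fold_eq : ∀ (events : List (List (String × String)))
    (rs : List (String × String × String)) (us : List String)
    (d : PySem.Dict String (PySem.Dict String (List String))),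
    List.foldl scheduleStepA (List.foldl groupStepB d rs, us) events
      = (List.foldl groupStepB d (List.foldl rowStepB (rs, us) events).1,
         (List.foldl rowStepB (rs, us) events).2) := by
  intro events
  induction events with
  | nil => intro rs us d; rfl
  | cons e tl ih =>
    intro rs us d
    rw [List.foldl_cons, List.foldl_cons]
    have hstep : scheduleStepA (List.foldl groupStepB d rs, us) e
        = (List.foldl groupStepB d (rowStepB (rs, us) e).1, (rowStepB (rs, us) e).2) ∧
        True := by
      constructor
      · unfold scheduleStepA rowStepB
        dsimp only
        rcases hs : (PySem.Dict.mk e : PySem.Dict String String).get? "summary" with _ | summary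
        · rfl
        · dsimp only
          by_cases he : summary = ""
          · rw [if_pos he, if_pos he]
          · rw [if_neg he, if_neg he]
            rw [parse_eq summary]
            rcases hp : parseSummaryB summary with _ | ⟨cls, period⟩
            · rfl
            · dsimp only
              simp only [List.foldl_append, List.foldl_cons, List.foldl_nil]
              rw [room_eq]
              exact congrArg (fun dd => (dd, us)) (stepA_dict_eq _ period cls _)
      · trivial
    rw [hstep.1]
    exact ih (rowStepB (rs, us) e).1 (rowStepB (rs, us) e).2 d

-- ===== VERDICT (by name: the statement is the Claim_ definition above) =====
theorem format_schedule_for_events_spec : Claim_equal_format_schedule_for_events := by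
  intro events _
  unfold Spec_format_schedule_for_events format_schedule_for_events format_schedule_for_events_alt
  have h := fold_eq events [] [] (PySem.Dict.mk [])
  rw [show List.foldl groupStepB (PySem.Dict.mk []) ([] : List (String × String × String))
      = PySem.Dict.mk [] from rfl] at h
  dsimp only
  rw [h]
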